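-- pv_equiv track=rewrite | github.com/trettier/hw | homework.py | ft_straight_code
-- ===== SOURCE A (Python) =====
-- def ft_straight_code(a):
--     if a < 0:
--         a = -1 * a
--         t = True
--     else:
--         t = False
--     n = 0
--     i = 1
--     while a > 0:
--         b = a % 2
--         a //= 2
--         n += b * i
--         i *= 10
--     if t:
--         n += 10 ** 6
--     return n
-- ===== SOURCE B (Python) =====
-- def ft_straight_code(a):
--     n = 0
--     for ch in bin(abs(a))[2:]:
--         n = 10 * n + ord(ch) - 48
--     return n + 10 ** 6 if a < 0 else n
-- ===== Notes on version B (the rewrite author's own statement) =====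
-- stated objective: alternative
-- what changed: Replaces A's destructive while-loop (repeated mod-two and halving with a running power-of-ten multiplier building the result least-significant-digit first) by a library base conversion: bin(abs(a))[2:] gives the binary digit string, which is then read most-significant-first with a plain decimal Horner accumulation (shift the accumulator one decimal place, add the digit); the same one-million sign marker is added for negative input.
import Mathlib
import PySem

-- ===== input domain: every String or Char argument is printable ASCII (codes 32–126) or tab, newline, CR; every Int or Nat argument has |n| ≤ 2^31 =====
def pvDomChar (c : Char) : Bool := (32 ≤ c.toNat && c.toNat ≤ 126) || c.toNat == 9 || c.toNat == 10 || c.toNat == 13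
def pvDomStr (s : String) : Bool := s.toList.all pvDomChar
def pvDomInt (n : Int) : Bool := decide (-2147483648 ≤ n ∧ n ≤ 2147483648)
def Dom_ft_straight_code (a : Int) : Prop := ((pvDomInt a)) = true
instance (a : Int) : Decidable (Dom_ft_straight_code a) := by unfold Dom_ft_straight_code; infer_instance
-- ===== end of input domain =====

-- B replaces A's mod-two/halving while-loop by a library base conversion bin(abs(a))[2:]
-- followed by a most-significant-first decimal Horner read of the digit string (same sign marker for negatives)
-- (objective: alternative, same asymptotic cost).

-- ===== PORT A =====
-- the 'while a > 0' loop of A, state (a, n, i)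
def ftLoop (a n i : Int) : Int :=
  if 0 < a then
    ftLoop (PySem.Int.floordiv a 2) (n + PySem.Int.mod a 2 * i) (i * 10)
  else n
termination_by a.toNat
decreasing_by
  simp only [PySem.Int.floordiv, Int.fdiv_eq_ediv]
  omega

def ft_straight_code (a : Int) : Int :=
  let p := if a < 0 then (-1 * a, true) else (a, false)
  let n := ftLoop p.1 0 1
  if p.2 then n + 10 ^ 6 else n

-- ===== PORT B =====
def ft_straight_code_alt (a : Int) : Int :=
  -- bin(abs(a))[2:]
  let s := PySem.Str.slice (PySem.Int.pyBin |a|) (some 2) none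
  -- for ch in s: n = 10 * n + ord(ch) - 48   (ord(ch) is ch.toNat, exact on ASCII)
  let n := s.toList.foldl (fun n ch => 10 * n + (ch.toNat : Int) - 48) 0
  if a < 0 then n + 10 ^ 6 else n

-- ===== PRECONDITION & SPEC =====
def Spec_ft_straight_code (a : Int) (out : Int) : Prop := out = ft_straight_code_alt a
instance (a : Int) (out : Int) : Decidable (Spec_ft_straight_code a out) := by unfold Spec_ft_straight_code; infer_instance

-- ===== CLAIM (what is proved, stated in full; the proofs are below) =====
def Claim_equal_ft_straight_code : Prop := ∀ (a : Int), Dom_ft_straight_code a → Spec_ft_straight_code a (ft_straight_code a)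

-- ===== LEMMAS AND PROOFS =====

-- the common value: binary digits of m read as a decimal number
def pvD2 : Nat → Int
  | 0 => 0
  | (m+1) => 10 * pvD2 ((m+1)/2) + ((m+1) % 2 : Nat)

theorem pv_fdiv_two (m : Nat) : ((m:Int)).fdiv 2 = ((m/2 : Nat):Int) := by
  rw [Int.fdiv_eq_ediv]; push_cast; simp

theorem pv_fmod_two (m : Nat) : ((m:Int)).fmod 2 = ((m % 2 : Nat):Int) := by
  rw [Int.fmod_eq_emod]; push_cast; simp

-- A's loop computes n + i * pvD2 m
theorem pv_ftLoop_eq (m : Nat) : ∀ n i : Int, ftLoop (m:Int) n i = n + i * pvD2 m := by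
  induction m using Nat.strong_induction_on with
  | _ m ih =>
    intro n i
    match m with
    | 0 => rw [ftLoop]; simp [pvD2]
    | (m+1) =>
      rw [ftLoop]
      have hpos : (0:Int) < ((m+1:Nat):Int) := by exact_mod_cast Nat.succ_pos m
      rw [if_pos hpos]
      simp only [PySem.Int.floordiv, PySem.Int.mod, pv_fdiv_two, pv_fmod_two]
      rw [ih ((m+1)/2) (Nat.div_lt_self (Nat.succ_pos m) (by omega))]
      show _ = n + i * pvD2 (m+1)
      rw [pvD2]; ring

-- B's Horner fold over the binary digit characters also computes pvD2 m
theorem pv_horner_toDigits (m : Nat) :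
    (Nat.toDigits 2 m).foldl (fun n ch => 10 * n + (ch.toNat : Int) - 48) 0 = pvD2 m := by
  induction m using Nat.strong_induction_on with
  | _ m ih =>
    rcases Nat.lt_or_ge m 2 with h2 | h2
    · interval_cases m <;> simp [Nat.toDigits_of_lt_base, pvD2] <;> decide
    · rw [Nat.toDigits_eq_if (by norm_num), if_neg (by omega), List.foldl_append]
      rw [ih (m / 2) (Nat.div_lt_self (by omega) (by omega))]
      have hm : ∃ k, m = k + 1 := ⟨m - 1, by omega⟩
      obtain ⟨k, rfl⟩ := hm
      simp only [List.foldl_cons, List.foldl_nil, pvD2]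
      rcases Nat.mod_two_eq_zero_or_one (k+1) with h | h <;> rw [h] <;> simp [Nat.digitChar] <;> ring

-- the slice bin(abs(a))[2:] is exactly the binary digit characters of a.natAbs
theorem pv_slice_bin (a : Int) :
    (PySem.Str.slice (PySem.Int.pyBin |a|) (some 2) none).toList = Nat.toDigits 2 a.natAbs := by
  rw [PySem.Str.toList_slice, PySem.Int.toList_pyBin]
  unfold PySem.Int.toBinChars0b
  rw [if_neg (not_lt.mpr (abs_nonneg a))]
  have h : |a|.toNat = a.natAbs := by rcases abs_cases a with ⟨h1,_⟩ | ⟨h1,_⟩ <;> omega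
  rw [h, PySem.Chars.slice_eq_listSlice, PySem.List.slice_from _ (by norm_num)]
  rfl

-- ===== VERDICT (by name: the statement is the Claim_ definition above) =====
theorem ft_straight_code_spec : Claim_equal_ft_straight_code := by
  unfold Claim_equal_ft_straight_code Spec_ft_straight_code
  intro a _
  unfold ft_straight_code ft_straight_code_alt
  simp only [pv_slice_bin]
  by_cases h : a < 0
  · have hneg : -1 * a = ((a.natAbs : Nat) : Int) := by
      rw [Int.natCast_natAbs, abs_of_neg h]; ring
    simp only [if_pos h, hneg]
    rw [pv_ftLoop_eq, pv_horner_toDigits]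
    simp
  · simp only [if_neg h]
    have ha : a = ((a.natAbs : Nat) : Int) := by omega
    rw [ha, pv_ftLoop_eq, pv_horner_toDigits]
    simp [Int.natAbs_abs]
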